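-- pv_equiv track=rewrite | github.com/IFT3275-Securite-Informatique/devoir-1-cryptographie-alexandre-mathieu | setup.py | extraire_cipher
-- ===== SOURCE A (Python) =====
-- from collections import Counter
--
-- def extraire_cipher(cipher: str) -> str:
--     ''' Extrait les symboles d'un message chiffré '''
--     chars = []
--
--     for x in range(int((len(cipher) / 8))):
--         pos = x*8
--         char = cipher[pos:pos+8]
--         chars.append(char)
--
--     chars_occurence = Counter(chars)
--     chars_occurence = {key: value for key, value in sorted(
--         chars_occurence.items(), key=lambda freq: freq[1], reverse=True)}
--     return chars_occurence
-- ===== SOURCE B (Python) =====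
-- def extraire_cipher(cipher: str) -> str:
--     ''' Extrait les symboles d'un message chiffré (counting-sort by frequency) '''
--     counts = {}
--     for x in range(len(cipher) // 8):
--         chunk = cipher[x*8:x*8+8]
--         counts[chunk] = counts.get(chunk, 0) + 1
--     buckets = {}
--     for chunk, f in counts.items():
--         buckets.setdefault(f, []).append(chunk)
--     result = {}
--     for f in range(max(counts.values(), default=0), 0, -1):
--         for chunk in buckets.get(f, []):
--             result[chunk] = f
--     return result
-- ===== Notes on version B (the rewrite author's own statement) =====
-- stated objective: alternative
-- what changed: Replaces the comparison sort of the chunk counter (sorted by count, reverse=True) with a counting sort: chunks are grouped into frequency buckets in first-appearance order and emitted by iterating frequencies from the maximum down, which reproduces the stable reverse sort exactly.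
import Mathlib
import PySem

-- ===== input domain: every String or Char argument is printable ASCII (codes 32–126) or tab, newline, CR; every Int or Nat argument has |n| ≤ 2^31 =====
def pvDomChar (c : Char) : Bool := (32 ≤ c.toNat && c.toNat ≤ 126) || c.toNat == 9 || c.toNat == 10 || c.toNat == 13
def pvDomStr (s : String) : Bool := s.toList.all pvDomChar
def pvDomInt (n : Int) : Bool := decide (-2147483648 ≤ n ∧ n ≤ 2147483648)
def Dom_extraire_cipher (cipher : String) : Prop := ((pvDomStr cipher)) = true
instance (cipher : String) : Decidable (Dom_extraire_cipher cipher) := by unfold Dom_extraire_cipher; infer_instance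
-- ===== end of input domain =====

-- B replaces the comparison sort of the chunk counter by a counting sort over frequency buckets
-- (same value: the descending bucket concatenation reproduces the stable reverse sort exactly).

-- ===== PORT A =====
def extraire_cipher (cipher : String) : List (String × Int) :=
  let chars : List String :=
    (PySem.List.pyRange 0 (PySem.Int.truncdiv (PySem.Str.len cipher) 8) 1).foldl
      (fun acc x => acc ++ [PySem.Str.slice cipher (some (x * 8)) (some (x * 8 + 8))]) []
  let chars_occurence := PySem.Dict.counter chars
  let sortedItems := PySem.List.sorted chars_occurence.items (fun p => p.2) true
  (sortedItems.foldl (fun d p => d.insert p.1 p.2) PySem.Dict.empty).items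

-- ===== PORT B =====
-- 'buckets.setdefault(f, []).append(chunk)' is ported as Dict.modify f [] (· ++ [chunk]) — exact:
-- it appends to the list stored at key f, starting from [] when f is absent.
def extraire_cipher_alt (cipher : String) : List (String × Int) :=
  let counts : PySem.Dict String Int :=
    (PySem.List.pyRange 0 (PySem.Int.floordiv (PySem.Str.len cipher) 8) 1).foldl
      (fun d x =>
        let chunk := PySem.Str.slice cipher (some (x * 8)) (some (x * 8 + 8))
        d.insert chunk (d.getD chunk 0 + 1)) PySem.Dict.empty
  let buckets : PySem.Dict Int (List String) :=
    counts.items.foldl (fun b p => b.modify p.2 [] (· ++ [p.1])) PySem.Dict.empty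
  let result : PySem.Dict String Int :=
    (PySem.List.pyRange (PySem.List.maxD counts.values (fun v => v) 0) 0 (-1)).foldl
      (fun d f => (buckets.getD f []).foldl (fun d chunk => d.insert chunk f) d) PySem.Dict.empty
  result.items

-- ===== PRECONDITION & SPEC =====
def Spec_extraire_cipher (cipher : String) (out : List (String × Int)) : Prop := out = extraire_cipher_alt cipher
instance (cipher : String) (out : List (String × Int)) : Decidable (Spec_extraire_cipher cipher out) := by unfold Spec_extraire_cipher; infer_instance

-- ===== CLAIM (what is proved, stated in full; the proofs are below) =====
def Claim_equal_extraire_cipher : Prop := ∀ (cipher : String), Dom_extraire_cipher cipher → Spec_extraire_cipher cipher (extraire_cipher cipher)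

-- ===== LEMMAS AND PROOFS =====

-- int(len/8) and len//8 agree on the nonnegative length
theorem pv_trunc_eq_floor (n : Int) (h : 0 ≤ n) :
    PySem.Int.truncdiv n 8 = PySem.Int.floordiv n 8 := by
  simp [PySem.Int.truncdiv, PySem.Int.floordiv, Int.tdiv_eq_ediv_of_nonneg h, Int.fdiv_eq_ediv]

-- insertBy skips a prefix no element of which triggers `before`
theorem pv_insertBy_append {α : Type} (before : α → α → Bool) (x : α) (pre suf : List α)
    (h : ∀ y ∈ pre, before x y = false) :
    PySem.List.insertBy before x (pre ++ suf) = pre ++ PySem.List.insertBy before x suf := by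
  induction pre with
  | nil => simp
  | cons y t ih =>
      have hy : before x y = false := h y (by simp)
      simp only [List.cons_append, PySem.List.insertBy, hy]
      simp [ih (fun z hz => h z (by simp [hz]))]

-- insertBy puts x in front when every element triggers `before`
theorem pv_insertBy_front {α : Type} (before : α → α → Bool) (x : α) (ys : List α)
    (h : ∀ y ∈ ys, before x y = true) :
    PySem.List.insertBy before x ys = x :: ys := by
  cases ys with
  | nil => rfl
  | cons y t => simp [PySem.List.insertBy, h y (by simp)]

-- adding an element whose key misses every listed frequency leaves the buckets unchanged
theorem pv_flat_congr {α : Type} (key : α → Int) (x : α) (l : List α) (fs : List Int)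
    (hx : ∀ f ∈ fs, key x ≠ f) :
    fs.flatMap (fun f => (l ++ [x]).filter (fun y => key y == f))
      = fs.flatMap (fun f => l.filter (fun y => key y == f)) := by
  induction fs with
  | nil => simp
  | cons f t ih =>
      have hf : (key x == f) = false := by
        simp [hx f (by simp)]
      rw [List.flatMap_cons, List.flatMap_cons, ih (fun g hg => hx g (by simp [hg]))]
      simp [List.filter_append, hf]

-- inserting x into the bucket concatenation appends it to its own bucket
theorem pv_flat_insert {α : Type} (key : α → Int) (x : α) (l : List α) (a b : Int)
    (hb : b < key x) (ha : key x ≤ a) :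
    PySem.List.insertBy (fun p q => decide (key q < key p)) x
        ((PySem.List.pyRange a b (-1)).flatMap (fun f => l.filter (fun y => key y == f)))
      = (PySem.List.pyRange a b (-1)).flatMap (fun f => (l ++ [x]).filter (fun y => key y == f)) := by
  obtain ⟨n, hn⟩ : ∃ n : Nat, a - key x = n := ⟨(a - key x).toNat, by omega⟩
  induction n generalizing a with
  | zero =>
      have hax : a = key x := by omega
      subst hax
      rw [PySem.List.pyRange_neg_one_cons hb]
      simp only [List.flatMap_cons]
      rw [pv_insertBy_append _ _ _ _ (by
        intro y hy
        have h2 : key y = key x := by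
          have := (List.mem_filter.1 hy).2
          simpa using this
        simp [h2])]
      rw [pv_insertBy_front _ _ _ (by
        intro y hy
        obtain ⟨f, hf, hyf⟩ := List.mem_flatMap.1 hy
        have hfr := (PySem.List.mem_pyRange_neg_one).1 hf
        have h2 : key y = f := by
          have := (List.mem_filter.1 hyf).2
          simpa using this
        simp only [decide_eq_true_eq]
        omega)]
      rw [pv_flat_congr key x l _ (by
        intro f hf
        have hfr := (PySem.List.mem_pyRange_neg_one).1 hf
        omega)]
      simp [List.filter_append]
  | succ n ih =>
      have hlt : key x < a := by omega
      rw [PySem.List.pyRange_neg_one_cons (by omega)]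
      simp only [List.flatMap_cons]
      rw [pv_insertBy_append _ _ _ _ (by
        intro y hy
        have h2 : key y = a := by
          have := (List.mem_filter.1 hy).2
          simpa using this
        simp [h2]; omega)]
      rw [ih (a - 1) (by omega) (by omega)]
      have hfa : (key x == a) = false := by simp; omega
      simp [List.filter_append, hfa]

-- Python's stable reverse sort by a bounded Int key IS the descending bucket concatenation
theorem pv_sorted_eq_flat {α : Type} (key : α → Int) (l : List α) (a b : Int)
    (hall : ∀ y ∈ l, b < key y ∧ key y ≤ a) :
    PySem.List.sorted l key true
      = (PySem.List.pyRange a b (-1)).flatMap (fun f => l.filter (fun y => key y == f)) := by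
  rw [PySem.List.sorted_rev_eq_foldl_insertBy]
  induction l using List.reverseRecOn with
  | nil => simp
  | append_singleton t x ih =>
      rw [List.foldl_append]
      simp only [List.foldl_cons, List.foldl_nil]
      rw [ih (fun y hy => hall y (by simp [hy]))]
      exact pv_flat_insert key x t a b (hall x (by simp)).1 (hall x (by simp)).2

-- a double insert loop is the single insert loop over the flattened (chunk, f) pairs
theorem pv_foldl_foldl_insert (fs : List Int) (g : Int → List String) (d0 : PySem.Dict String Int) :
    fs.foldl (fun d f => (g f).foldl (fun d c => d.insert c f) d) d0
      = (fs.flatMap (fun f => (g f).map (fun c => (c, f)))).foldl (fun d p => d.insert p.1 p.2) d0 := by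
  induction fs generalizing d0 with
  | nil => simp
  | cons f t ih =>
      rw [List.foldl_cons, List.flatMap_cons, List.foldl_append, ih]
      congr 1
      rw [List.foldl_map]

-- ===== VERDICT (by name: the statement is the Claim_ definition above) =====
theorem extraire_cipher_spec : Claim_equal_extraire_cipher := by
  intro cipher _
  show extraire_cipher cipher = extraire_cipher_alt cipher
  unfold extraire_cipher extraire_cipher_alt
  have hlen : (0:Int) ≤ PySem.Str.len cipher := by
    rw [PySem.Str.len_eq]; positivity
  rw [pv_trunc_eq_floor _ hlen]
  set R := PySem.List.pyRange 0 (PySem.Int.floordiv (PySem.Str.len cipher) 8) 1 with hR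
  set cf := fun x : Int => PySem.Str.slice cipher (some (x * 8)) (some (x * 8 + 8)) with hcf
  -- A's chars list is the chunk map
  rw [PySem.List.foldl_append_singleton_eq_map cf R []]
  simp only [List.nil_append]
  -- B's counts is the same Counter
  have hcounts : R.foldl (fun d x => d.insert (cf x) (d.getD (cf x) 0 + 1)) PySem.Dict.empty
      = PySem.Dict.counter (R.map cf) := by
    rw [← List.foldl_map (f := cf)
        (g := fun (d : PySem.Dict String Int) c => d.insert c (d.getD c 0 + 1)),
      PySem.Dict.foldl_insert_getD_add_one_eq_counter]
  rw [hcounts]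
  set chs := R.map cf with hchs
  set items := (PySem.Dict.counter chs).items with hitems
  set M := PySem.List.maxD (PySem.Dict.counter chs).values (fun v => v) 0 with hM
  -- B's bucket for frequency f holds the chunks whose count is f, in first-appearance order
  have hbuck : ∀ f : Int,
      (items.foldl (fun b p => b.modify p.2 [] (· ++ [p.1])) PySem.Dict.empty).getD f []
        = (items.filter (fun p => p.2 == f)).map (·.1) := by
    intro f
    rw [← List.foldl_map (f := fun p : String × Int => (p.2, p.1))
      (g := fun b q => PySem.Dict.modify b q.1 [] (· ++ [q.2]))]
    rw [PySem.Dict.getD_foldl_modify_append]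
    simp [List.filter_map, Function.comp_def, List.map_map]
  -- every count is positive and at most M
  have hall : ∀ p ∈ items, (0:Int) < p.2 ∧ p.2 ≤ M := by
    intro p hp
    refine ⟨?_, ?_⟩
    · rw [hitems, PySem.Dict.items_counter] at hp
      obtain ⟨k, hk, rfl⟩ := List.mem_map.1 hp
      have hkc : k ∈ chs := (PySem.Set.mem_ofList _ _).1 hk
      simpa using List.count_pos_iff.2 hkc
    · have hv : p.2 ∈ (PySem.Dict.counter chs).values := by
        have hvals : (PySem.Dict.counter chs).values = items.map (·.2) := rfl
        rw [hvals]; exact List.mem_map_of_mem hp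
      rcases hmax : PySem.List.max? (PySem.Dict.counter chs).values (fun v => v) with _ | m
      · rw [PySem.List.max?_eq_none_iff] at hmax
        rw [hmax] at hv; simp at hv
      · have hle := PySem.List.max?_isMax hmax p.2 hv
        rw [hM]; simp [PySem.List.maxD, hmax]; exact hle
  -- Python's stable reverse sort is the descending bucket concatenation
  have hsorted := pv_sorted_eq_flat (fun p : String × Int => p.2) items M 0
    (fun y hy => ⟨(hall y hy).1, (hall y hy).2⟩)
  rw [hsorted]
  simp only [hbuck]
  rw [pv_foldl_foldl_insert]
  have hcollapse : ∀ f : Int,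
      ((items.filter (fun p => p.2 == f)).map (·.1)).map (fun c => (c, f))
        = items.filter (fun p => p.2 == f) := by
    intro f
    rw [List.map_map]
    conv_rhs => rw [← List.map_id (items.filter (fun p => p.2 == f))]
    refine List.map_congr_left ?_
    intro p hp
    have h2 : p.2 = f := by simpa using (List.mem_filter.1 hp).2
    simp [← h2]
  simp only [hcollapse]
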